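-- pv_equiv track=rewrite | github.com/ssullivan/advent-of-code | 2018/day2/part1.py | get_letter_freq
-- ===== SOURCE A (Python) =====
-- def get_letter_freq(barcode: str) -> tuple:
--   freq = {}
--   two_count = 0
--   three_count = 0
--   for i in range(0, len(barcode)):
--     slice = barcode[i:i+1]
--     if slice == None:
--       break
--     if slice in freq:
--       freq[slice] += 1
--     else:
--       freq[slice] = 1
--
--   for slice in freq:
--     if freq[slice] == 2 and two_count == 0:
--       two_count = 1
--     elif freq[slice] == 3 and three_count == 0:
--       three_count = 1
--
--   return tuple([two_count, three_count])
-- ===== SOURCE B (Python) =====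
-- def get_letter_freq(barcode: str) -> tuple:
--   lengths = set()
--   run = 0
--   prev = None
--   for ch in sorted(barcode):
--     if ch == prev:
--       run += 1
--     else:
--       if run != 0:
--         lengths.add(run)
--       run = 1
--       prev = ch
--   if run != 0:
--     lengths.add(run)
--   return (1 if 2 in lengths else 0, 1 if 3 in lengths else 0)
-- ===== Notes on version B (the rewrite author's own statement) =====
-- stated objective: alternative
-- what changed: Replaces the frequency dictionary plus key scan with a sort-then-consecutive-run scan: run lengths of sorted(barcode) are collected into a set and the result is membership of 2 and 3 in that set.
import Mathlib
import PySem

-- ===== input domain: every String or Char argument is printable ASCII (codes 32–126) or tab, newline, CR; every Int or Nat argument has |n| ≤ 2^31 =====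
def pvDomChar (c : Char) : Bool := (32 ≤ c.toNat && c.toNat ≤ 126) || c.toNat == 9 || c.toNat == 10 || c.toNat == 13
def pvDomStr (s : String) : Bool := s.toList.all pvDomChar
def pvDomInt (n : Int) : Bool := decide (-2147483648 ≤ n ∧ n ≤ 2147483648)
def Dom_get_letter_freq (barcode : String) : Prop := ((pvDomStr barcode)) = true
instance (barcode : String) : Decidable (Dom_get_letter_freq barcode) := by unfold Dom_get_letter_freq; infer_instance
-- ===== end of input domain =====

-- B replaces A's frequency dictionary + key scan with a sort-then-consecutive-run scan
-- (set of run lengths of sorted(barcode)); alternative algorithm, no speed claim.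

-- ===== PORT A =====
def get_letter_freq (barcode : String) : Int × Int :=
  let chars := barcode.toList
  let freq := (PySem.List.pyRange 0 (PySem.List.len chars) 1).foldl
    (fun (freq : PySem.Dict (List Char) Int) i =>
      let slice := PySem.List.slice chars (some i) (some (i + 1))
      -- 'if slice == None: break' — a Python str is never equal to None, the branch never fires
      if freq.contains slice then freq.insert slice (freq.getD slice 0 + 1)
      else freq.insert slice 1)
    PySem.Dict.empty
  let tc := freq.keys.foldl
    (fun (tc : Int × Int) slice =>
      if freq.getD slice 0 == 2 && tc.1 == 0 then (1, tc.2)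
      else if freq.getD slice 0 == 3 && tc.2 == 0 then (tc.1, 1)
      else tc)
    (0, 0)
  (tc.1, tc.2)

-- ===== PORT B =====
def get_letter_freq_alt (barcode : String) : Int × Int :=
  let st := (PySem.List.sorted barcode.toList (fun c => c) false).foldl
    (fun (st : PySem.Set Int × Int × Option Char) ch =>
      if some ch == st.2.2 then (st.1, st.2.1 + 1, st.2.2)
      else ((if st.2.1 != 0 then PySem.Set.add st.1 st.2.1 else st.1), 1, some ch))
    (PySem.Set.empty, 0, none)
  let lengths := if st.2.1 != 0 then PySem.Set.add st.1 st.2.1 else st.1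
  ((if PySem.Set.contains lengths 2 then 1 else 0),
   (if PySem.Set.contains lengths 3 then 1 else 0))

-- ===== PRECONDITION & SPEC =====
def Spec_get_letter_freq (barcode : String) (out : Int × Int) : Prop := out = get_letter_freq_alt barcode
instance (barcode : String) (out : Int × Int) : Decidable (Spec_get_letter_freq barcode out) := by unfold Spec_get_letter_freq; infer_instance

-- ===== CLAIM (what is proved, stated in full; the proofs are below) =====
def Claim_equal_get_letter_freq : Prop := ∀ (barcode : String), Dom_get_letter_freq barcode → Spec_get_letter_freq barcode (get_letter_freq barcode)

-- ===== LEMMAS AND PROOFS =====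

-- the common value both ports compute: does some character occur exactly 2 (resp. 3) times?
def pvAnswer (chars : List Char) : Int × Int :=
  ((if ∃ c ∈ chars, (chars.count c : Int) = 2 then 1 else 0),
   (if ∃ c ∈ chars, (chars.count c : Int) = 3 then 1 else 0))

-- A's first loop builds Counter(map singleton chars)
theorem aLoop_eq_counter (chars : List Char) :
    (PySem.List.pyRange 0 (PySem.List.len chars) 1).foldl
      (fun (freq : PySem.Dict (List Char) Int) i =>
        let slice := PySem.List.slice chars (some i) (some (i + 1))
        if freq.contains slice then freq.insert slice (freq.getD slice 0 + 1)
        else freq.insert slice 1)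
      PySem.Dict.empty
    = PySem.Dict.counter (chars.map (fun c => [c])) := by
  rw [← PySem.Dict.foldl_insert_getD_add_one_eq_counter]
  conv_rhs => rw [← PySem.List.map_pyGetD_pyRange_zero chars 'a', List.map_map, List.foldl_map]
  apply PySem.List.foldl_congr_mem
  intro acc i hi
  rw [PySem.List.mem_pyRange_one] at hi
  obtain ⟨h0, h1⟩ := hi
  rw [PySem.List.len_eq] at h1
  have hsl : PySem.List.slice chars (some i) (some (i + 1)) = [chars[i.toNat]] := by
    rw [PySem.List.slice_toNat chars h0 (by omega)]
    have ht : (i + 1).toNat - i.toNat = 1 := by omega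
    have hlt : i.toNat < chars.length := by omega
    rw [ht, show List.drop i.toNat chars = chars[i.toNat] :: List.drop (i.toNat + 1) chars from
      List.drop_eq_getElem_cons hlt]
    rfl
  have hg : PySem.List.pyGetD chars i 'a' = chars[i.toNat] :=
    PySem.List.pyGetD_eq_getElem chars 'a' h0 h1
  simp only [hsl, Function.comp, hg]
  by_cases hc : acc.contains [chars[i.toNat]] = true
  · simp [hc]
  · simp only [Bool.not_eq_true] at hc
    rw [if_neg (by simp [hc]), PySem.Dict.getD_of_not_contains acc 0 hc]
    norm_num

-- A's second loop, characterised (f abstracts the dict lookup)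
theorem aScan1 (f : List Char → Int) (v : Int) (K : List (List Char)) (t : Int) :
    K.foldl (fun t s => if f s == v && t == 0 then 1 else t) t
    = if t = 0 ∧ ∃ s ∈ K, f s = v then 1 else t := by
  induction K generalizing t with
  | nil => simp
  | cons s K ih =>
    rw [List.foldl_cons]
    by_cases h : f s = v ∧ t = 0
    · rw [show (if f s == v && t == 0 then (1 : Int) else t) = 1 from by simp [h.1, h.2]]
      rw [ih, if_neg (by simp), if_pos ⟨h.2, s, List.mem_cons_self, h.1⟩]
    · rw [show (if f s == v && t == 0 then (1 : Int) else t) = t from by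
        rcases not_and_or.1 h with h' | h' <;> simp [h']]
      rw [ih]
      by_cases ht : t = 0
      · subst ht
        have hiff : (∃ s' ∈ K, f s' = v) ↔ (∃ s' ∈ s :: K, f s' = v) := by
          constructor
          · rintro ⟨c, hc, hcv⟩
            exact ⟨c, List.mem_cons_of_mem _ hc, hcv⟩
          · rintro ⟨c, hc, hcv⟩
            rcases List.mem_cons.1 hc with rfl | hc2
            · exact absurd ⟨hcv, rfl⟩ h
            · exact ⟨c, hc2, hcv⟩
        rw [if_congr (and_congr_right fun _ => hiff) rfl rfl]
      · rw [if_neg (fun hh => ht hh.1), if_neg (fun hh => ht hh.1)]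

theorem aScan_split (f : List Char → Int) (K : List (List Char)) (t2 t3 : Int) :
    K.foldl
      (fun (tc : Int × Int) slice =>
        if f slice == 2 && tc.1 == 0 then (1, tc.2)
        else if f slice == 3 && tc.2 == 0 then (tc.1, 1)
        else tc)
      (t2, t3)
    = (K.foldl (fun t s => if f s == 2 && t == 0 then 1 else t) t2,
       K.foldl (fun t s => if f s == 3 && t == 0 then 1 else t) t3) := by
  induction K generalizing t2 t3 with
  | nil => rfl
  | cons s K ih =>
    have hb : (if f s == 2 && (t2, t3).1 == 0 then ((1 : Int), (t2, t3).2)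
        else if f s == 3 && (t2, t3).2 == 0 then ((t2, t3).1, 1)
        else (t2, t3))
        = ((if f s == 2 && t2 == 0 then 1 else t2), (if f s == 3 && t3 == 0 then 1 else t3)) := by
      by_cases h2 : (f s == 2 && t2 == 0) = true
      · have h3 : (f s == 3 && t3 == 0) = false := by
          simp only [Bool.and_eq_true, beq_iff_eq] at h2
          simp [h2.1]
        simp [h2, h3]
      · by_cases h3 : (f s == 3 && t3 == 0) = true
        · simp [h2, h3]
        · simp [h2, h3]
    rw [List.foldl_cons, hb, ih, List.foldl_cons, List.foldl_cons]

theorem ex_map_singleton (chars : List Char) (k : Int) :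
    (∃ s ∈ chars.map (fun c => [c]), ((chars.map (fun c => [c])).count s : Int) = k) ↔
      ∃ c ∈ chars, (chars.count c : Int) = k := by
  have hinj : Function.Injective (fun c : Char => [c]) := by
    intro a b h; simpa using h
  constructor
  · rintro ⟨s, hs, hv⟩
    obtain ⟨c, hc, rfl⟩ := List.mem_map.1 hs
    refine ⟨c, hc, ?_⟩
    rwa [List.count_map_of_injective chars _ hinj c] at hv
  · rintro ⟨c, hc, hv⟩
    refine ⟨[c], List.mem_map.2 ⟨c, hc, rfl⟩, ?_⟩
    rwa [List.count_map_of_injective chars _ hinj c]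

theorem a_eq_answer (barcode : String) : get_letter_freq barcode = pvAnswer barcode.toList := by
  simp only [get_letter_freq]
  rw [aLoop_eq_counter, PySem.Dict.keys_counter,
    aScan_split (fun s => (PySem.Dict.counter (barcode.toList.map (fun c => [c]))).getD s 0),
    aScan1, aScan1]
  simp only [PySem.Dict.getD_counter, pvAnswer, true_and]
  have hmem : ∀ (k : Int),
      (∃ s ∈ PySem.Set.ofList (barcode.toList.map (fun c => [c])),
        ((List.count s (barcode.toList.map (fun c => [c])) : Nat) : Int) = k) ↔
      (∃ c ∈ barcode.toList, (barcode.toList.count c : Int) = k) := by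
    intro k
    rw [← ex_map_singleton barcode.toList k]
    constructor
    · rintro ⟨s, hs, hv⟩
      exact ⟨s, (PySem.Set.mem_ofList _ s).1 hs, hv⟩
    · rintro ⟨s, hs, hv⟩
      exact ⟨s, (PySem.Set.mem_ofList _ s).2 hs, hv⟩
  rw [if_congr (hmem 2) rfl rfl, if_congr (hmem 3) rfl rfl]

-- B's run scan: membership in the final length set, on a sorted tail
def bStep (st : PySem.Set Int × Int × Option Char) (ch : Char) : PySem.Set Int × Int × Option Char :=
  if some ch == st.2.2 then (st.1, st.2.1 + 1, st.2.2)
  else ((if st.2.1 != 0 then PySem.Set.add st.1 st.2.1 else st.1), 1, some ch)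

def bFinal (st : PySem.Set Int × Int × Option Char) : PySem.Set Int :=
  if st.2.1 != 0 then PySem.Set.add st.1 st.2.1 else st.1

theorem bScan_mem (l : List Char) (p : Char) (r : Int) (lengths : PySem.Set Int) (k : Int)
    (hs : l.Pairwise (· ≤ ·)) (hp : ∀ x ∈ l, p ≤ x) (hr : 1 ≤ r) :
    (k ∈ bFinal (l.foldl bStep (lengths, r, some p)) ↔
      k ∈ lengths ∨ k = r + l.count p ∨ ∃ c ∈ l, c ≠ p ∧ (l.count c : Int) = k) := by
  induction l generalizing p r lengths with
  | nil =>
    simp only [List.foldl_nil, bFinal, List.count_nil, List.not_mem_nil]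
    rw [if_pos (by simp; omega)]
    rw [PySem.Set.mem_add]
    constructor
    · rintro (h | h)
      · exact Or.inl h
      · exact Or.inr (Or.inl (by omega))
    · rintro (h | h | ⟨c, hc, -⟩)
      · exact Or.inl h
      · exact Or.inr (by omega)
      · exact absurd hc (by simp)
  | cons x l ih =>
    have hpl : l.Pairwise (· ≤ ·) := hs.tail
    have hxl : ∀ y ∈ l, x ≤ y := fun y hy => (List.pairwise_cons.1 hs).1 y hy
    simp only [List.foldl_cons]
    by_cases hx : x = p
    · subst hx
      have hstep : bStep (lengths, r, some x) x = (lengths, r + 1, some x) := by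
        simp [bStep]
      rw [hstep, ih x (r + 1) lengths hpl (fun y hy => hp y (List.mem_cons_of_mem _ hy)) (by omega)]
      constructor
      · rintro (h | h | ⟨c, hc, hcp, hcv⟩)
        · exact Or.inl h
        · refine Or.inr (Or.inl ?_)
          rw [List.count_cons_self]
          push_cast
          omega
        · refine Or.inr (Or.inr ⟨c, List.mem_cons_of_mem _ hc, hcp, ?_⟩)
          rw [List.count_cons_of_ne (Ne.symm hcp)]
          exact hcv
      · rintro (h | h | ⟨c, hc, hcp, hcv⟩)
        · exact Or.inl h
        · refine Or.inr (Or.inl ?_)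
          rw [List.count_cons_self] at h
          push_cast at h
          omega
        · rcases List.mem_cons.1 hc with rfl | hc2
          · exact absurd rfl hcp
          · refine Or.inr (Or.inr ⟨c, hc2, hcp, ?_⟩)
            rw [List.count_cons_of_ne (Ne.symm hcp)] at hcv
            exact hcv
    · have hpx : p < x := lt_of_le_of_ne (hp x (List.mem_cons_self)) (fun h => hx h.symm)
      have hpnotin : p ∉ x :: l := by
        intro hmem
        rcases List.mem_cons.1 hmem with rfl | hmem2
        · exact absurd rfl (ne_of_lt hpx)
        · exact absurd (hxl p hmem2) (not_le.2 hpx)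
      have hstep : bStep (lengths, r, some p) x = (PySem.Set.add lengths r, 1, some x) := by
        simp only [bStep]
        rw [if_neg (by simp [hx]), if_pos (by simp; omega)]
      rw [hstep, ih x 1 (PySem.Set.add lengths r) hpl hxl le_rfl]
      have hcp0 : l.count p = 0 := by
        rw [List.count_eq_zero]
        intro hmem
        exact hpnotin (List.mem_cons_of_mem _ hmem)
      rw [PySem.Set.mem_add]
      constructor
      · rintro ((h | h) | h | ⟨c, hc, hcx, hcv⟩)
        · exact Or.inl h
        · refine Or.inr (Or.inl ?_)
          rw [List.count_cons_of_ne (Ne.symm (fun h' => hx h'.symm)), hcp0]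
          omega
        · refine Or.inr (Or.inr ⟨x, List.mem_cons_self, hx, ?_⟩)
          rw [List.count_cons_self]
          push_cast
          omega
        · have hcpne : c ≠ p := by
            intro h'
            subst h'
            exact hpnotin (List.mem_cons_of_mem _ hc)
          refine Or.inr (Or.inr ⟨c, List.mem_cons_of_mem _ hc, hcpne, ?_⟩)
          rw [List.count_cons_of_ne (Ne.symm hcx)]
          exact hcv
      · rintro (h | h | ⟨c, hc, hcp, hcv⟩)
        · exact Or.inl (Or.inl h)
        · refine Or.inl (Or.inr ?_)
          rw [List.count_cons_of_ne (Ne.symm (fun h' => hx h'.symm)), hcp0] at h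
          omega
        · rcases List.mem_cons.1 hc with rfl | hc2
          · refine Or.inr (Or.inl ?_)
            rw [List.count_cons_self] at hcv
            push_cast at hcv
            omega
          · by_cases hcx : c = x
            · subst hcx
              refine Or.inr (Or.inl ?_)
              rw [List.count_cons_self] at hcv
              push_cast at hcv
              omega
            · refine Or.inr (Or.inr ⟨c, hc2, hcx, ?_⟩)
              rw [List.count_cons_of_ne (Ne.symm hcx)] at hcv
              exact hcv

theorem bScan_mem_top (s : List Char) (hs : s.Pairwise (· ≤ ·)) (k : Int) :
    (k ∈ bFinal (s.foldl bStep (PySem.Set.empty, 0, none)) ↔ ∃ c ∈ s, (s.count c : Int) = k) := by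
  cases s with
  | nil =>
    simp [bFinal, PySem.Set.empty]
  | cons x l =>
    have hpl : l.Pairwise (· ≤ ·) := hs.tail
    have hxl : ∀ y ∈ l, x ≤ y := fun y hy => (List.pairwise_cons.1 hs).1 y hy
    simp only [List.foldl_cons]
    have hstep : bStep (PySem.Set.empty, 0, none) x = (PySem.Set.empty, 1, some x) := by
      simp [bStep]
    rw [hstep, bScan_mem l x 1 PySem.Set.empty k hpl hxl le_rfl]
    constructor
    · rintro (h | h | ⟨c, hc, hcx, hcv⟩)
      · exact absurd h (by simp [PySem.Set.empty])
      · refine ⟨x, List.mem_cons_self, ?_⟩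
        rw [List.count_cons_self]
        push_cast
        omega
      · refine ⟨c, List.mem_cons_of_mem _ hc, ?_⟩
        rw [List.count_cons_of_ne (Ne.symm hcx)]
        exact hcv
    · rintro ⟨c, hc, hcv⟩
      rcases List.mem_cons.1 hc with rfl | hc2
      · refine Or.inr (Or.inl ?_)
        rw [List.count_cons_self] at hcv
        push_cast at hcv
        omega
      · by_cases hcx : c = x
        · subst hcx
          refine Or.inr (Or.inl ?_)
          rw [List.count_cons_self] at hcv
          push_cast at hcv
          omega
        · refine Or.inr (Or.inr ⟨c, hc2, hcx, ?_⟩)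
          rw [List.count_cons_of_ne (Ne.symm hcx)] at hcv
          exact hcv

theorem b_eq_answer (barcode : String) : get_letter_freq_alt barcode = pvAnswer barcode.toList := by
  simp only [get_letter_freq_alt]
  have hfold : ∀ (init : PySem.Set Int × Int × Option Char),
      (PySem.List.sorted barcode.toList (fun c => c) false).foldl
        (fun (st : PySem.Set Int × Int × Option Char) ch =>
          if some ch == st.2.2 then (st.1, st.2.1 + 1, st.2.2)
          else ((if st.2.1 != 0 then PySem.Set.add st.1 st.2.1 else st.1), 1, some ch)) init
      = (PySem.List.sorted barcode.toList (fun c => c) false).foldl bStep init := fun _ => rfl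
  rw [hfold]
  set s := PySem.List.sorted barcode.toList (fun c => c) false with hsdef
  have hsp : s.Pairwise (· ≤ ·) := PySem.List.sorted_pairwise barcode.toList (fun c => c)
  have hperm : s.Perm barcode.toList := PySem.List.sorted_perm barcode.toList (fun c => c) false
  have hmem : ∀ (k : Int),
      PySem.Set.contains (bFinal (s.foldl bStep (PySem.Set.empty, 0, none))) k = true ↔
        ∃ c ∈ barcode.toList, (barcode.toList.count c : Int) = k := by
    intro k
    rw [PySem.Set.contains_iff, bScan_mem_top s hsp k]
    constructor
    · rintro ⟨c, hc, hv⟩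
      refine ⟨c, hperm.mem_iff.1 hc, ?_⟩
      rwa [hperm.count_eq] at hv
    · rintro ⟨c, hc, hv⟩
      refine ⟨c, hperm.mem_iff.2 hc, ?_⟩
      rwa [hperm.count_eq]
  show ((if PySem.Set.contains (bFinal (s.foldl bStep (PySem.Set.empty, 0, none))) 2 = true then (1:Int) else 0),
        (if PySem.Set.contains (bFinal (s.foldl bStep (PySem.Set.empty, 0, none))) 3 = true then (1:Int) else 0))
      = pvAnswer barcode.toList
  rw [if_congr (hmem 2) rfl rfl, if_congr (hmem 3) rfl rfl]
  rfl

-- ===== VERDICT (by name: the statement is the Claim_ definition above) =====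
theorem get_letter_freq_spec : Claim_equal_get_letter_freq := by
  intro barcode _
  unfold Spec_get_letter_freq
  rw [a_eq_answer, b_eq_answer]
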